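-- pv_equiv track=rewrite | github.com/mat-1/forum-sweats | forumsweats/commands/automute.py | get_mute_reason_keyword
-- ===== SOURCE A (Python) =====
-- from typing import Union
--
-- infraction_keywords = {
-- 	'spam': 60 * 30,
-- 	'chat flood': 60 * 30,
--
-- 	'nsfw': 60 * 60 * 10,
--
-- 	'toxic': 60 * 60,
--
-- 	'drama': 60 * 30,
--
-- 	'discrimination': 60 * 60 * 24,
--
-- 	'slur': 60 * 60 * 24,
--
-- 	'dox': 60 * 60 * 24 * 7,
--
-- 	# this catches both 'racist' and 'racism'
-- 	'racis': 60 * 60 * 24 * 3,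
--
-- 	'bypassing filter': 60 * 30,
-- 	'filter bypass': 60 * 30,
--
-- 	None: 60 * 1
-- }
--
-- def get_mute_reason_keyword(reason) -> Union[str, None]:
-- 	if reason is None:
-- 		return None
-- 	mute_length = 0
-- 	mute_keyword = None
-- 	for possible_keyword in infraction_keywords:
-- 		if possible_keyword and possible_keyword in reason.lower() and infraction_keywords[possible_keyword] > mute_length:
-- 			mute_length = infraction_keywords[possible_keyword]
-- 			mute_keyword = possible_keyword
-- 	return mute_keyword
-- ===== SOURCE B (Python) =====
-- from typing import Union
--
-- infraction_keywords = {
-- 	'spam': 60 * 30,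
-- 	'chat flood': 60 * 30,
-- 	'nsfw': 60 * 60 * 10,
-- 	'toxic': 60 * 60,
-- 	'drama': 60 * 30,
-- 	'discrimination': 60 * 60 * 24,
-- 	'slur': 60 * 60 * 24,
-- 	'dox': 60 * 60 * 24 * 7,
-- 	'racis': 60 * 60 * 24 * 3,
-- 	'bypassing filter': 60 * 30,
-- 	'filter bypass': 60 * 30,
-- 	None: 60 * 1
-- }
--
-- # Precomputed once: non-None keywords in descending mute-time order.
-- # Python's stable sort preserves dict order among equal times, so the first
-- # substring hit below is exactly A's strict-'>' running-max winner.
-- _priority = [k for k, t in sorted(infraction_keywords.items(), key=lambda kv: kv[1], reverse=True) if k is not None]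
--
-- def get_mute_reason_keyword(reason) -> Union[str, None]:
-- 	if reason is None:
-- 		return None
-- 	lowered = reason.lower()
-- 	for keyword in _priority:
-- 		if keyword in lowered:
-- 			return keyword
-- 	return None
-- ===== Notes on version B (the rewrite author's own statement) =====
-- stated objective: alternative
-- what changed: Replaces A's accumulator-carrying running-max scan over the dict with a module-load precomputed priority list (keywords sorted by descending mute time, stable) scanned with an early return on the first substring hit.
import Mathlib
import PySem

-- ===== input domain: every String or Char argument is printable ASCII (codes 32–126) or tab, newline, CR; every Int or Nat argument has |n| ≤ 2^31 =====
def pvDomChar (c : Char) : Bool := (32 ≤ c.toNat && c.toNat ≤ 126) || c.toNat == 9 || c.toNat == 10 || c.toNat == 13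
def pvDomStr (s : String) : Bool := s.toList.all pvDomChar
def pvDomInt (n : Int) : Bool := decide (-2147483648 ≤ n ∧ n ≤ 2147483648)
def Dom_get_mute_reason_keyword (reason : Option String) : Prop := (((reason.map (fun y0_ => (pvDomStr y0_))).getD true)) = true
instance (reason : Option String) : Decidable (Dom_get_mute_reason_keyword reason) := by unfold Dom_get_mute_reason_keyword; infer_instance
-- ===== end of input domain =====

-- B replaces A's running-max accumulator scan with a precomputed descending-priority list and a first-match scan (alternative decomposition, same cost).


-- ===== PORT A =====
-- the module-level dict, keys in insertion order (None key modelled as `none`)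
def infraction_keywords : PySem.Dict (Option String) Int :=
  PySem.Dict.ofList
    [(some "spam", 60 * 30), (some "chat flood", 60 * 30), (some "nsfw", 60 * 60 * 10),
     (some "toxic", 60 * 60), (some "drama", 60 * 30), (some "discrimination", 60 * 60 * 24),
     (some "slur", 60 * 60 * 24), (some "dox", 60 * 60 * 24 * 7), (some "racis", 60 * 60 * 24 * 3),
     (some "bypassing filter", 60 * 30), (some "filter bypass", 60 * 30), (none, 60 * 1)]

def get_mute_reason_keyword (reason : Option String) : Option String :=
  match reason with
  | none => none
  | some r =>
    -- mute_length = 0; mute_keyword = None; for possible_keyword in infraction_keywords: …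
    let st :=
      infraction_keywords.keys.foldl
        (fun (st : Int × Option String) possible_keyword =>
          -- 'possible_keyword and possible_keyword in reason.lower() and …'
          -- (None is falsy; every string key is non-empty hence truthy)
          match possible_keyword with
          | none => st
          | some k =>
            if PySem.Str.isIn k (PySem.Str.lower r) &&
               decide (PySem.Dict.getD infraction_keywords (some k) 0 > st.1) then
              (PySem.Dict.getD infraction_keywords (some k) 0, some k)
            else st)
        (0, none)
    st.2

-- ===== PORT B =====
-- _priority = [k for k, t in sorted(infraction_keywords.items(), key=lambda kv: kv[1], reverse=True) if k is not None]
def priority_keywords : List String :=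
  ((PySem.List.sorted infraction_keywords.items (fun kv => kv.2) true).filter
      (fun kv => kv.1 ≠ none)).filterMap (fun kv => kv.1)

-- 'for keyword in _priority: if keyword in lowered: return keyword' / 'return None'
def firstMatch (ks : List String) (lowered : String) : Option String :=
  match ks with
  | [] => none
  | k :: rest => if PySem.Str.isIn k lowered then some k else firstMatch rest lowered

def get_mute_reason_keyword_alt (reason : Option String) : Option String :=
  match reason with
  | none => none
  | some r => firstMatch priority_keywords (PySem.Str.lower r)

-- ===== PRECONDITION & SPEC =====
def Spec_get_mute_reason_keyword (reason : Option String) (out : Option String) : Prop := out = get_mute_reason_keyword_alt reason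
instance (reason : Option String) (out : Option String) : Decidable (Spec_get_mute_reason_keyword reason out) := by unfold Spec_get_mute_reason_keyword; infer_instance

-- ===== CLAIM (what is proved, stated in full; the proofs are below) =====
def Claim_equal_get_mute_reason_keyword : Prop := ∀ (reason : Option String), Dom_get_mute_reason_keyword reason → Spec_get_mute_reason_keyword reason (get_mute_reason_keyword reason)

-- ===== LEMMAS AND PROOFS =====
-- A's loop / B's scan as functions of the eleven substring tests
def aEval (b1 b2 b3 b4 b5 b6 b7 b8 b9 b10 b11 : Bool) : Option String :=
  ((let st := (let st := (let st := (let st := (let st := (let st := (let st := (let st := (let st := (let st := (let st := (0, (none : Option String));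
   if b1 && decide ((1800 : Int) > st.1) then ((1800 : Int), some "spam") else st);
   if b2 && decide ((1800 : Int) > st.1) then ((1800 : Int), some "chat flood") else st);
   if b3 && decide ((36000 : Int) > st.1) then ((36000 : Int), some "nsfw") else st);
   if b4 && decide ((3600 : Int) > st.1) then ((3600 : Int), some "toxic") else st);
   if b5 && decide ((1800 : Int) > st.1) then ((1800 : Int), some "drama") else st);
   if b6 && decide ((86400 : Int) > st.1) then ((86400 : Int), some "discrimination") else st);
   if b7 && decide ((86400 : Int) > st.1) then ((86400 : Int), some "slur") else st);
   if b8 && decide ((604800 : Int) > st.1) then ((604800 : Int), some "dox") else st);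
   if b9 && decide ((259200 : Int) > st.1) then ((259200 : Int), some "racis") else st);
   if b10 && decide ((1800 : Int) > st.1) then ((1800 : Int), some "bypassing filter") else st);
   if b11 && decide ((1800 : Int) > st.1) then ((1800 : Int), some "filter bypass") else st)).2

def bEval (b1 b2 b3 b4 b5 b6 b7 b8 b9 b10 b11 : Bool) : Option String :=
  if b8 then some "dox" else if b9 then some "racis" else if b6 then some "discrimination" else if b7 then some "slur" else if b3 then some "nsfw" else if b4 then some "toxic" else if b1 then some "spam" else if b2 then some "chat flood" else if b5 then some "drama" else if b10 then some "bypassing filter" else if b11 then some "filter bypass" else none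

theorem aBridge (r : String) : get_mute_reason_keyword (some r) = aEval (PySem.Str.isIn "spam" (PySem.Str.lower r)) (PySem.Str.isIn "chat flood" (PySem.Str.lower r)) (PySem.Str.isIn "nsfw" (PySem.Str.lower r)) (PySem.Str.isIn "toxic" (PySem.Str.lower r)) (PySem.Str.isIn "drama" (PySem.Str.lower r)) (PySem.Str.isIn "discrimination" (PySem.Str.lower r)) (PySem.Str.isIn "slur" (PySem.Str.lower r)) (PySem.Str.isIn "dox" (PySem.Str.lower r)) (PySem.Str.isIn "racis" (PySem.Str.lower r)) (PySem.Str.isIn "bypassing filter" (PySem.Str.lower r)) (PySem.Str.isIn "filter bypass" (PySem.Str.lower r)) := rfl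

theorem bBridge (r : String) : get_mute_reason_keyword_alt (some r) = bEval (PySem.Str.isIn "spam" (PySem.Str.lower r)) (PySem.Str.isIn "chat flood" (PySem.Str.lower r)) (PySem.Str.isIn "nsfw" (PySem.Str.lower r)) (PySem.Str.isIn "toxic" (PySem.Str.lower r)) (PySem.Str.isIn "drama" (PySem.Str.lower r)) (PySem.Str.isIn "discrimination" (PySem.Str.lower r)) (PySem.Str.isIn "slur" (PySem.Str.lower r)) (PySem.Str.isIn "dox" (PySem.Str.lower r)) (PySem.Str.isIn "racis" (PySem.Str.lower r)) (PySem.Str.isIn "bypassing filter" (PySem.Str.lower r)) (PySem.Str.isIn "filter bypass" (PySem.Str.lower r)) := rfl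

theorem eval_eq : ∀ (b1 b2 b3 b4 b5 b6 b7 b8 b9 b10 b11 : Bool), aEval b1 b2 b3 b4 b5 b6 b7 b8 b9 b10 b11 = bEval b1 b2 b3 b4 b5 b6 b7 b8 b9 b10 b11 := by decide

-- ===== VERDICT (by name: the statement is the Claim_ definition above) =====
theorem get_mute_reason_keyword_spec : Claim_equal_get_mute_reason_keyword := by
  intro reason _
  unfold Spec_get_mute_reason_keyword
  cases reason with
  | none => rfl
  | some r => rw [aBridge, bBridge, eval_eq]
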